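-- pv_equiv track=rewrite | github.com/LucasCabra7/5_Lista_Introducao_Programacao | questão3.py | derivar_polinomio
-- ===== SOURCE A (Python) =====
-- def derivar_polinomio(coeficientes, expoentes, ordem):
--     if(ordem == 0):
--         return coeficientes, expoentes
--
--     novos_coeficientes = []
--     novos_expoentes = []
--
--     for i in range(len(coeficientes)):
--         if(expoentes[i] > 0):
--             novos_coeficientes.append(coeficientes[i] * expoentes[i])
--             novos_expoentes.append(expoentes[i] - 1)
--         else:
--             novos_coeficientes.append(0)
--             novos_expoentes.append(0)
--     return derivar_polinomio(novos_coeficientes, novos_expoentes, ordem - 1)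
-- ===== SOURCE B (Python) =====
-- def derivar_polinomio(coeficientes, expoentes, ordem):
--     # Closed form: the ordem-th derivative of c*x^e is c * e*(e-1)*...*(e-ordem+1) * x^(e-ordem)
--     # when e >= ordem, and the zero term (0, 0) otherwise (A collapses exhausted terms to (0, 0)).
--     if ordem == 0:
--         return coeficientes, expoentes
--     novos_coeficientes = []
--     novos_expoentes = []
--     for c, e in zip(coeficientes, expoentes):
--         if e >= ordem:
--             f = 1
--             for k in range(ordem):
--                 f *= e - k
--             novos_coeficientes.append(c * f)
--             novos_expoentes.append(e - ordem)
--         else: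
--             novos_coeficientes.append(0)
--             novos_expoentes.append(0)
--     return novos_coeficientes, novos_expoentes
-- ===== Notes on version B (the rewrite author's own statement) =====
-- stated objective: faster
-- what changed: Replaces A's ordem-deep recursion (rebuilding both lists once per derivative order) with a single pass that computes each term's falling-factorial coefficient in closed form; terms with exponent below ordem become (0,0) at once.
import Mathlib
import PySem

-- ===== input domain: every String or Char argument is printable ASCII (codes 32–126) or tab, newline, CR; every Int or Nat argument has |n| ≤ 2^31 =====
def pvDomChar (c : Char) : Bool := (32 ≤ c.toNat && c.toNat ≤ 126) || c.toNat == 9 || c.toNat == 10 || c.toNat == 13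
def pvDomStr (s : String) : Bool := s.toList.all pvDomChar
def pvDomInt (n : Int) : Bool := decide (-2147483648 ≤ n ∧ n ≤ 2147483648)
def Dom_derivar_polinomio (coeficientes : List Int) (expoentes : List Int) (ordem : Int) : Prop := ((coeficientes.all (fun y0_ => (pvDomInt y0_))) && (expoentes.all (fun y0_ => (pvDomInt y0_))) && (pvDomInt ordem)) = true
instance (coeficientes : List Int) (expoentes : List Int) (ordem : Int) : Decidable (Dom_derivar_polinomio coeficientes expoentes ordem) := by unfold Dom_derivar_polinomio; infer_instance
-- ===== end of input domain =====

-- B replaces A's ordem-deep recursion by one pass computing each term's falling-factorial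
-- coefficient in closed form (objective: faster). Return-value equivalence; neither mutates.

-- ===== PORT A =====
-- the body of A's loop over range(len(coeficientes)); one derivative step
def pvStepA (coeficientes expoentes : List Int) : List Int × List Int :=
  (PySem.List.pyRange 0 (PySem.List.len coeficientes) 1).foldl
    (fun (acc : List Int × List Int) i =>
      if PySem.List.pyGetD expoentes i 0 > 0 then
        (acc.1 ++ [PySem.List.pyGetD coeficientes i 0 * PySem.List.pyGetD expoentes i 0],
         acc.2 ++ [PySem.List.pyGetD expoentes i 0 - 1])
      else
        (acc.1 ++ [0], acc.2 ++ [0]))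
    ([], [])

-- A's recursion on ordem; the fuel is ordem.toNat (Python diverges for ordem < 0, outside Pre_)
def pvDerivA (coeficientes expoentes : List Int) : Nat → List Int × List Int
  | 0 => (coeficientes, expoentes)
  | n + 1 =>
    let st := pvStepA coeficientes expoentes
    pvDerivA st.1 st.2 n

def derivar_polinomio (coeficientes : List Int) (expoentes : List Int) (ordem : Int) : List Int × List Int :=
  pvDerivA coeficientes expoentes ordem.toNat

-- ===== PORT B =====
-- f accumulated over 'for k in range(ordem): f *= e - k'
def pvFall (e : Int) (ordem : Int) : Int :=
  (PySem.List.pyRange 0 ordem 1).foldl (fun f k => f * (e - k)) 1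

def derivar_polinomio_alt (coeficientes : List Int) (expoentes : List Int) (ordem : Int) : List Int × List Int :=
  if ordem = 0 then (coeficientes, expoentes)
  else
    (coeficientes.zip expoentes).foldl
      (fun (acc : List Int × List Int) p =>
        if p.2 ≥ ordem then
          (acc.1 ++ [p.1 * pvFall p.2 ordem], acc.2 ++ [p.2 - ordem])
        else
          (acc.1 ++ [0], acc.2 ++ [0]))
      ([], [])

-- ===== PRECONDITION & SPEC =====
-- Pre_ excludes only inputs where Python A raises rather than returns: ordem < 0
-- (A recurses without ever reaching the base case), and, for ordem > 0, expoentes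
-- shorter than coeficientes (IndexError inside the loop).
def Pre_derivar_polinomio (coeficientes : List Int) (expoentes : List Int) (ordem : Int) : Prop :=
  ordem = 0 ∨ (0 < ordem ∧ coeficientes.length ≤ expoentes.length)
instance (coeficientes : List Int) (expoentes : List Int) (ordem : Int) : Decidable (Pre_derivar_polinomio coeficientes expoentes ordem) := by unfold Pre_derivar_polinomio; infer_instance

def pvWitness_derivar_polinomio : List Int × List Int × Int := ([3, 2, 5], [2, 1, 0], 1)

def Spec_derivar_polinomio (coeficientes : List Int) (expoentes : List Int) (ordem : Int) (out : List Int × List Int) : Prop := out = derivar_polinomio_alt coeficientes expoentes ordem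
instance (coeficientes : List Int) (expoentes : List Int) (ordem : Int) (out : List Int × List Int) : Decidable (Spec_derivar_polinomio coeficientes expoentes ordem out) := by unfold Spec_derivar_polinomio; infer_instance

-- ===== CLAIM (what is proved, stated in full; the proofs are below) =====
def Claim_equal_derivar_polinomio : Prop := ∀ (coeficientes : List Int) (expoentes : List Int) (ordem : Int), Dom_derivar_polinomio coeficientes expoentes ordem → Pre_derivar_polinomio coeficientes expoentes ordem → Spec_derivar_polinomio coeficientes expoentes ordem (derivar_polinomio coeficientes expoentes ordem)

-- ===== LEMMAS AND PROOFS =====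

-- one derivative step applied to one (coefficient, exponent) pair (A's loop body, pointwise)
def pvAStep (p : Int × Int) : Int × Int :=
  if p.2 > 0 then (p.1 * p.2, p.2 - 1) else (0, 0)

-- B's loop body, pointwise
def pvBStep (ordem : Int) (p : Int × Int) : Int × Int :=
  if p.2 ≥ ordem then (p.1 * pvFall p.2 ordem, p.2 - ordem) else (0, 0)

-- mapping an index-reading function over range(len c) is mapping over zip c e
lemma pvRangeMapZip {γ : Type} (f : Int → Int → γ) :
    ∀ (c e : List Int), c.length ≤ e.length →
      (List.range c.length).map (fun k => f (c.getD k 0) (e.getD k 0)) =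
        (c.zip e).map (fun p => f p.1 p.2)
  | [], _, _ => by simp
  | c0 :: cs, [], h => by simp at h
  | c0 :: cs, e0 :: es, h => by
    simp only [List.length_cons, List.range_succ_eq_map, List.map_cons, List.map_map,
      Function.comp_def, List.getD_cons_zero, List.getD_cons_succ, List.zip_cons_cons]
    rw [pvRangeMapZip f cs es (by simpa using h)]

lemma pvStepA_eq (c e : List Int) (h : c.length ≤ e.length) :
    pvStepA c e = (((c.zip e).map pvAStep).map Prod.fst, ((c.zip e).map pvAStep).map Prod.snd) := by
  unfold pvStepA
  have hbody : (fun (acc : List Int × List Int) (i : Int) =>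
      if PySem.List.pyGetD e i 0 > 0 then
        (acc.1 ++ [PySem.List.pyGetD c i 0 * PySem.List.pyGetD e i 0],
         acc.2 ++ [PySem.List.pyGetD e i 0 - 1])
      else (acc.1 ++ [0], acc.2 ++ [0])) =
      fun acc i =>
        (acc.1 ++ [(pvAStep (PySem.List.pyGetD c i 0, PySem.List.pyGetD e i 0)).1],
         acc.2 ++ [(pvAStep (PySem.List.pyGetD c i 0, PySem.List.pyGetD e i 0)).2]) := by
    funext acc i
    simp only [pvAStep]
    split <;> simp
  rw [hbody,
    PySem.List.foldl_prod_mk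
      (f := fun s i => s ++ [(pvAStep (PySem.List.pyGetD c i 0, PySem.List.pyGetD e i 0)).1])
      (g := fun s i => s ++ [(pvAStep (PySem.List.pyGetD c i 0, PySem.List.pyGetD e i 0)).2]),
    PySem.List.foldl_append_singleton_eq_map, PySem.List.foldl_append_singleton_eq_map]
  simp only [List.nil_append, PySem.List.len_eq, PySem.List.pyRange_one, List.map_map,
    Function.comp_def, Int.sub_zero, Int.toNat_natCast, zero_add, PySem.List.pyGetD_natCast]
  congr 1
  · exact (pvRangeMapZip (fun x y => (pvAStep (x, y)).1) c e h).trans (by simp)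
  · exact (pvRangeMapZip (fun x y => (pvAStep (x, y)).2) c e h).trans (by simp)

lemma pvAlt_eq (c e : List Int) (o : Int) (ho : o ≠ 0) :
    derivar_polinomio_alt c e o =
      (((c.zip e).map (pvBStep o)).map Prod.fst, ((c.zip e).map (pvBStep o)).map Prod.snd) := by
  unfold derivar_polinomio_alt
  rw [if_neg ho]
  have hbody : (fun (acc : List Int × List Int) (p : Int × Int) =>
      if p.2 ≥ o then (acc.1 ++ [p.1 * pvFall p.2 o], acc.2 ++ [p.2 - o])
      else (acc.1 ++ [0], acc.2 ++ [0])) =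
      fun acc p => (acc.1 ++ [(pvBStep o p).1], acc.2 ++ [(pvBStep o p).2]) := by
    funext acc p
    simp only [pvBStep]
    split <;> simp
  rw [hbody,
    PySem.List.foldl_prod_mk
      (f := fun s p => s ++ [(pvBStep o p).1])
      (g := fun s p => s ++ [(pvBStep o p).2]),
    PySem.List.foldl_append_singleton_eq_map, PySem.List.foldl_append_singleton_eq_map]
  simp [List.map_map, Function.comp_def]

lemma pvDerivA_succ_eq : ∀ (n : Nat) (c e : List Int), c.length ≤ e.length →
    pvDerivA c e (n + 1) =
      (((c.zip e).map pvAStep^[n + 1]).map Prod.fst, ((c.zip e).map pvAStep^[n + 1]).map Prod.snd)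
  | 0, c, e, h => by
    have := pvStepA_eq c e h
    simpa [pvDerivA] using this
  | n + 1, c, e, h => by
    show pvDerivA (pvStepA c e).1 (pvStepA c e).2 (n + 1) = _
    rw [pvStepA_eq c e h]
    rw [pvDerivA_succ_eq n _ _ (by simp)]
    simp only [List.zip_map', List.map_map, Function.comp_def, Prod.mk.eta,
      ← Function.iterate_succ_apply]

lemma pvFall_zero (e : Int) : pvFall e 0 = 1 := by
  simp [pvFall, PySem.List.pyRange_one_eq_nil]

lemma pvFall_succ (e o : Int) (ho : 0 ≤ o) : pvFall e (o + 1) = e * pvFall (e - 1) o := by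
  unfold pvFall
  rw [PySem.List.pyRange_one_cons (by omega : (0 : Int) < o + 1)]
  simp only [List.foldl_cons, one_mul]
  rw [← List.foldl_map (f := fun k => e - k) (g := (· * ·)),
      ← List.foldl_map (f := fun k => (e - 1) - k) (g := (· * ·))]
  have hlists : (PySem.List.pyRange (0 + 1) (o + 1) 1).map (fun k => e - k) =
      (PySem.List.pyRange 0 o 1).map (fun k => (e - 1) - k) := by
    simp only [PySem.List.pyRange_one, List.map_map, Function.comp_def]
    have : (o + 1 - (0 + 1)).toNat = (o - 0).toNat := by omega
    rw [this]
    apply List.map_congr_left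
    intro k _
    ring
  rw [hlists]
  rw [show e - 0 = (e - 0) * 1 from by ring, List.foldl_assoc]
  simp

lemma pvStep_iter : ∀ (n : Nat) (p : Int × Int), pvAStep^[n + 1] p = pvBStep ((n : Int) + 1) p
  | 0, p => by
    rw [Function.iterate_one]
    unfold pvAStep pvBStep
    push_cast
    have hf : ∀ x : Int, pvFall x 1 = x := fun x => by
      rw [show (1 : Int) = 0 + 1 by norm_num, pvFall_succ x 0 le_rfl, pvFall_zero]; ring
    by_cases hp : p.2 > 0
    · rw [if_pos hp, if_pos (show p.2 ≥ (1 : Int) by omega), hf]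
    · rw [if_neg hp, if_neg (show ¬ p.2 ≥ (1 : Int) by omega)]
  | n + 1, p => by
    rw [Function.iterate_succ_apply, pvStep_iter n (pvAStep p)]
    unfold pvAStep pvBStep
    push_cast
    by_cases hp : p.2 > 0
    · rw [if_pos hp]
      dsimp only
      by_cases hbig : p.2 ≥ (n : Int) + 1 + 1
      · rw [if_pos (show p.2 - 1 ≥ (n : Int) + 1 by omega), if_pos hbig]
        rw [pvFall_succ p.2 ((n : Int) + 1) (by omega)]
        simp only [Prod.mk.injEq]
        exact ⟨by ring, by omega⟩
      · rw [if_neg (show ¬ p.2 - 1 ≥ (n : Int) + 1 by omega), if_neg hbig]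
    · rw [if_neg hp]
      dsimp only
      rw [if_neg (show ¬ (0 : Int) ≥ (n : Int) + 1 by omega),
        if_neg (show ¬ p.2 ≥ (n : Int) + 1 + 1 by omega)]

-- ===== VERDICT (by name: the statement is the Claim_ definition above) =====
theorem derivar_polinomio_spec : Claim_equal_derivar_polinomio := by
  intro c e o _ hpre
  unfold Spec_derivar_polinomio derivar_polinomio
  rcases hpre with h0 | ⟨hpos, hlen⟩
  · subst h0
    simp [pvDerivA, derivar_polinomio_alt]
  · have hn : o.toNat = (o.toNat - 1) + 1 := by omega
    rw [hn, pvDerivA_succ_eq (o.toNat - 1) c e hlen]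
    have hcast : ((o.toNat - 1 : Nat) : Int) + 1 = o := by omega
    rw [pvAlt_eq c e o (by omega)]
    have hfun : pvAStep^[(o.toNat - 1) + 1] = pvBStep o := by
      funext p
      rw [pvStep_iter (o.toNat - 1) p, hcast]
    rw [hfun]
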